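-- pv_equiv track=rewrite | github.com/ashishkumarpalai/basic_ro_advance_python | set2.py | arrange_characters
-- ===== SOURCE A (Python) =====
-- def arrange_characters(string):
--     lower_chars = ""
--     upper_chars = ""
--
--     for char in string:
--         if char.islower():
--             lower_chars += char
--         else:
--             upper_chars += char
--
--     arranged_string = lower_chars + upper_chars
--     return arranged_string
-- ===== SOURCE B (Python) =====
-- def arrange_characters(string):
--     return "".join(sorted(string, key=lambda c: not c.islower()))
-- ===== Notes on version B (the rewrite author's own statement) =====
-- stated objective: idiomatic
-- what changed: Replaced the two-accumulator partition loop with a single stable sort keyed on whether the character is not lowercase, so lowercase characters come first and each group keeps its original order.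
import Mathlib
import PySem

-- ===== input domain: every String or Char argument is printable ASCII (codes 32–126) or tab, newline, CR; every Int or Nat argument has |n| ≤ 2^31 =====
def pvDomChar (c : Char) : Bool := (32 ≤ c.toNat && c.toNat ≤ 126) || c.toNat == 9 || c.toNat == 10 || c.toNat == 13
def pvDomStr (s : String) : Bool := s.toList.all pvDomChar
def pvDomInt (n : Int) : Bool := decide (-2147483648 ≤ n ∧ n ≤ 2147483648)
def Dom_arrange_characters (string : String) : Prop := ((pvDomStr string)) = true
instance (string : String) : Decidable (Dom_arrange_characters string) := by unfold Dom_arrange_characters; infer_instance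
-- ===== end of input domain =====

-- B replaces A's two-accumulator partition loop with a single stable sort keyed on the
-- negated lowercase test (idiomatic one-liner; same return value, no speed claim).


-- ===== PORT A =====
-- for char in string: if char.islower(): lower += char else: upper += char; return lower + upper
def arrange_characters (string : String) : String :=
  let p := string.toList.foldl
    (fun (acc : List Char × List Char) (c : Char) =>
      if PySem.Chars.islower c then (acc.1 ++ [c], acc.2) else (acc.1, acc.2 ++ [c]))
    ([], [])
  String.ofList (p.1 ++ p.2)

-- ===== PORT B =====
-- "".join of the string sorted stably with the negated lowercase test as key
def arrange_characters_alt (string : String) : String :=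
  String.ofList (PySem.List.sorted string.toList (fun c => !PySem.Chars.islower c) false)

-- ===== PRECONDITION & SPEC =====
def Spec_arrange_characters (string : String) (out : String) : Prop := out = arrange_characters_alt string
instance (string : String) (out : String) : Decidable (Spec_arrange_characters string out) := by unfold Spec_arrange_characters; infer_instance

-- ===== CLAIM (what is proved, stated in full; the proofs are below) =====
def Claim_equal_arrange_characters : Prop := ∀ (string : String), Dom_arrange_characters string → Spec_arrange_characters string (arrange_characters string)

-- ===== LEMMAS AND PROOFS =====

-- the comparison function the stable insertion sort uses for B's key
def pvBef : Char → Char → Bool :=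
  fun a b => decide ((!PySem.Chars.islower a) < (!PySem.Chars.islower b))

theorem pvBef_low_low {x a : Char} (hx : PySem.Chars.islower x = true)
    (ha : PySem.Chars.islower a = true) : pvBef x a = false := by
  simp [pvBef, hx, ha]

theorem pvBef_low_high {x u : Char} (hx : PySem.Chars.islower x = true)
    (hu : PySem.Chars.islower u = false) : pvBef x u = true := by
  simp [pvBef, hx, hu]

theorem pvBef_high {x : Char} (hx : PySem.Chars.islower x = false) (y : Char) :
    pvBef x y = false := by
  simp only [pvBef, hx, Bool.not_false]
  cases h : PySem.Chars.islower y <;> simp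

theorem insertBy_part_low (x : Char) (L U : List Char)
    (hx : PySem.Chars.islower x = true)
    (hL : ∀ c ∈ L, PySem.Chars.islower c = true)
    (hU : ∀ c ∈ U, PySem.Chars.islower c = false) :
    PySem.List.insertBy pvBef x (L ++ U) = L ++ x :: U := by
  induction L with
  | nil =>
    cases U with
    | nil => rfl
    | cons u t =>
      simp [PySem.List.insertBy, pvBef_low_high hx (hU u (by simp))]
  | cons a L ih =>
    have ha := hL a (by simp)
    simp only [List.cons_append, PySem.List.insertBy, pvBef_low_low hx ha,
      Bool.false_eq_true, if_false]
    rw [ih (fun c hc => hL c (by simp [hc]))]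

theorem insertBy_part_high (x : Char) (ys : List Char)
    (hx : PySem.Chars.islower x = false) :
    PySem.List.insertBy pvBef x ys = ys ++ [x] :=
  PySem.List.insertBy_of_forall_not_before pvBef x ys (fun y _ => pvBef_high hx y)

theorem foldl_insertBy_part (xs : List Char) : ∀ (L U : List Char),
    (∀ c ∈ L, PySem.Chars.islower c = true) →
    (∀ c ∈ U, PySem.Chars.islower c = false) →
    xs.foldl (fun acc x => PySem.List.insertBy pvBef x acc) (L ++ U)
      = (L ++ xs.filter (fun c => PySem.Chars.islower c))
          ++ (U ++ xs.filter (fun c => !PySem.Chars.islower c)) := by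
  induction xs with
  | nil => intro L U _ _; simp
  | cons x xs ih =>
    intro L U hL hU
    cases hx : PySem.Chars.islower x with
    | true =>
      have hL' : ∀ c ∈ L ++ [x], PySem.Chars.islower c = true := by
        intro c hc
        rcases List.mem_append.mp hc with h | h
        · exact hL c h
        · simp at h; rw [h]; exact hx
      have h1 : PySem.List.insertBy pvBef x (L ++ U) = (L ++ [x]) ++ U := by
        rw [insertBy_part_low x L U hx hL hU]; simp
      simp only [List.foldl_cons, h1]
      rw [ih (L ++ [x]) U hL' hU]
      simp [hx]
    | false =>
      have hU' : ∀ c ∈ U ++ [x], PySem.Chars.islower c = false := by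
        intro c hc
        rcases List.mem_append.mp hc with h | h
        · exact hU c h
        · simp at h; rw [h]; exact hx
      have h1 : PySem.List.insertBy pvBef x (L ++ U) = L ++ (U ++ [x]) := by
        rw [insertBy_part_high x (L ++ U) hx]; simp
      simp only [List.foldl_cons, h1]
      rw [ih L (U ++ [x]) hL hU']
      simp [hx]

theorem sorted_part (xs : List Char) :
    PySem.List.sorted xs (fun c => !PySem.Chars.islower c) false
      = xs.filter (fun c => PySem.Chars.islower c)
          ++ xs.filter (fun c => !PySem.Chars.islower c) := by
  rw [PySem.List.sorted_eq_foldl_insertBy]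
  have := foldl_insertBy_part xs [] [] (by simp) (by simp)
  simpa [pvBef] using this

theorem foldlA_part (xs : List Char) : ∀ (l u : List Char),
    xs.foldl (fun (acc : List Char × List Char) (c : Char) =>
        if PySem.Chars.islower c then (acc.1 ++ [c], acc.2) else (acc.1, acc.2 ++ [c])) (l, u)
      = (l ++ xs.filter (fun c => PySem.Chars.islower c),
         u ++ xs.filter (fun c => !PySem.Chars.islower c)) := by
  induction xs with
  | nil => intro l u; simp
  | cons x xs ih =>
    intro l u
    cases hx : PySem.Chars.islower x <;>
      simp [hx, ih]

-- ===== VERDICT (by name: the statement is the Claim_ definition above) =====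
theorem arrange_characters_spec : Claim_equal_arrange_characters := by
  intro s _
  unfold Spec_arrange_characters arrange_characters arrange_characters_alt
  rw [sorted_part, foldlA_part]
  simp
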